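-- pv_equiv track=rewrite | github.com/CloudNativeWorks/cnw-ai | elchi/src/cnw_ai/pipeline/parsers/markdown.py | _split_rst_sections
-- ===== SOURCE A (Python) =====
-- _RST_UNDERLINE_CHARS = set("=-~^`_*+#")
--
-- def _split_rst_sections(text: str) -> list[tuple[str, str]]:
--     """Split RST text into (heading, body) sections."""
--     lines = text.split("\n")
--     sections: list[tuple[str, str]] = []
--     current_heading = ""
--     current_body: list[str] = []
--
--     i = 0
--     while i < len(lines):
--         # Check if next line is an RST underline
--         if (
--             i + 1 < len(lines)
--             and len(lines[i + 1]) >= 2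
--             and len(set(lines[i + 1].strip())) == 1
--             and lines[i + 1].strip()[0] in _RST_UNDERLINE_CHARS
--             and lines[i].strip()
--         ):
--             # Save previous section
--             body = "\n".join(current_body).strip()
--             if body:
--                 sections.append((current_heading, body))
--             current_heading = lines[i].strip()
--             current_body = []
--             i += 2  # skip heading + underline
--             continue
--
--         current_body.append(lines[i])
--         i += 1
--
--     # Last section
--     body = "\n".join(current_body).strip()
--     if body:
--         sections.append((current_heading, body))
--
--     return sections if sections else [("", text.strip())]
-- ===== SOURCE B (Python) =====
-- _RST_UNDERLINE_CHARS = set("=-~^`_*+#")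
--
--
-- def _split_rst_sections(text: str) -> list[tuple[str, str]]:
--     """Split RST text into (heading, body) sections (two-pass: mark headings, then slice)."""
--     lines = text.split("\n")
--     n = len(lines)
--
--     def is_heading(i: int) -> bool:
--         return bool(
--             i + 1 < n
--             and len(lines[i + 1]) >= 2
--             and len(set(lines[i + 1].strip())) == 1
--             and lines[i + 1].strip()[0] in _RST_UNDERLINE_CHARS
--             and lines[i].strip()
--         )
--
--     # Pass 1: collect heading line indices, skipping past each underline.
--     marks = []
--     i = 0
--     while i < n:
--         if is_heading(i):
--             marks.append(i)
--             i += 2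
--         else:
--             i += 1
--
--     # Pass 2: slice bodies between boundaries.
--     bounds = [("", 0)] + [(lines[m].strip(), m + 2) for m in marks]
--     ends = marks + [n]
--     sections = []
--     for (h, s), e in zip(bounds, ends):
--         body = "\n".join(lines[s:e]).strip()
--         if body:
--             sections.append((h, body))
--     return sections if sections else [("", text.strip())]
-- ===== Notes on version B (the rewrite author's own statement) =====
-- stated objective: alternative
-- what changed: Replaces A's single stateful while-loop (carrying current_heading/current_body/sections) with a two-pass decomposition: first collect heading line indices (skipping each underline), then build each section by slicing the lines between consecutive boundaries.
import Mathlib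
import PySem

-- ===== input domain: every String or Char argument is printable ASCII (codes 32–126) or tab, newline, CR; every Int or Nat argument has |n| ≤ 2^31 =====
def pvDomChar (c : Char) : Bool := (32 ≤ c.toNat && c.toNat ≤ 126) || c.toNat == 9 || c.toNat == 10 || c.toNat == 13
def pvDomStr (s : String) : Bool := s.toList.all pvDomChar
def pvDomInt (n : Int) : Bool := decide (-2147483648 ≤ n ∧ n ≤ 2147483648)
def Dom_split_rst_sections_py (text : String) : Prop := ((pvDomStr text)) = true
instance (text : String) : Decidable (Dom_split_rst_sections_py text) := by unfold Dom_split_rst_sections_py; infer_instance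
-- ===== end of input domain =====

-- B is an alternative two-pass decomposition (mark heading indices, then slice bodies);
-- same exact return value, similar O(n) cost.

-- ===== PORT A =====

-- _RST_UNDERLINE_CHARS = set("=-~^`_*+#")
def rstUnderlineChars : PySem.Set Char := PySem.Set.ofList "=-~^`_*+#".toList

-- the underline-heading test both Pythons perform on lines[i] (l0) and lines[i+1] (l1)
def predHead (l0 l1 : String) : Bool :=
  (decide (2 ≤ PySem.Str.len l1))
  && (PySem.Set.len (PySem.Set.ofList (PySem.Str.strip l1).toList) == 1)
  && (match PySem.Str.pyGet? (PySem.Str.strip l1) 0 with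
      | some c => PySem.Set.contains rstUnderlineChars c
      | none => false)
  && (decide (PySem.Str.strip l0 ≠ ""))

-- A's while-loop, step for step: state = (current_heading, current_body, sections)
def aLoop (rest : List String) (heading : String) (body : List String)
    (secs : List (String × String)) : List (String × String) :=
  match rest with
  | l0 :: l1 :: rs =>
      if predHead l0 l1 then
        let b := PySem.Str.strip (PySem.Str.join "\n" body)
        aLoop rs (PySem.Str.strip l0) [] (if b ≠ "" then secs ++ [(heading, b)] else secs)
      else
        aLoop (l1 :: rs) heading (body ++ [l0]) secs
  | [l0] =>
      let b := PySem.Str.strip (PySem.Str.join "\n" (body ++ [l0]))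
      if b ≠ "" then secs ++ [(heading, b)] else secs
  | [] =>
      let b := PySem.Str.strip (PySem.Str.join "\n" body)
      if b ≠ "" then secs ++ [(heading, b)] else secs
termination_by rest.length
decreasing_by all_goals simp

def split_rst_sections_py (text : String) : List (String × String) :=
  let lines := (PySem.Str.split? text "\n").getD []
  let secs := aLoop lines "" [] []
  if secs = [] then [("", PySem.Str.strip text)] else secs

-- ===== PORT B =====

-- is_heading(i) of Source B: indexes lines[i] and lines[i+1]
def predIdx (lines : List String) (i : Nat) : Bool :=
  match lines[i]?, lines[i+1]? with
  | some l0, some l1 => predHead l0 l1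
  | _, _ => false

-- pass 1 of Source B: heading line indices, skipping past each underline
def bMarks (lines : List String) (i : Nat) : List Nat :=
  if _h : i < lines.length then
    if predIdx lines i then i :: bMarks lines (i + 2) else bMarks lines (i + 1)
  else []
termination_by lines.length - i

def split_rst_sections_py_alt (text : String) : List (String × String) :=
  let lines := (PySem.Str.split? text "\n").getD []
  let marks := bMarks lines 0
  let bounds := ("", (0 : Nat)) :: marks.map (fun m => (PySem.Str.strip (lines.getD m ""), m + 2))
  let ends := marks ++ [lines.length]
  let secs := (bounds.zip ends).foldl
    (fun acc be =>
      let body := PySem.Str.strip (PySem.Str.join "\n"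
        (PySem.List.slice lines (some (be.1.2 : Int)) (some (be.2 : Int))))
      if body ≠ "" then acc ++ [(be.1.1, body)] else acc) []
  if secs = [] then [("", PySem.Str.strip text)] else secs

-- ===== PRECONDITION & SPEC =====
def Spec_split_rst_sections_py (text : String) (out : List (String × String)) : Prop := out = split_rst_sections_py_alt text
instance (text : String) (out : List (String × String)) : Decidable (Spec_split_rst_sections_py text out) := by unfold Spec_split_rst_sections_py; infer_instance

-- ===== CLAIM (what is proved, stated in full; the proofs are below) =====
def Claim_equal_split_rst_sections_py : Prop := ∀ (text : String), Dom_split_rst_sections_py text → Spec_split_rst_sections_py text (split_rst_sections_py text)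

-- ===== LEMMAS AND PROOFS =====

-- emit one section if the body is non-empty
def emitSec (h b : String) : List (String × String) :=
  if b ≠ "" then [(h, b)] else []

-- the sections generated from position s on, given the pending body prefix `pre`,
-- the current heading h, and the heading indices ms ≥ s
def pass2p (lines : List String) (pre : List String) (h : String) (s : Nat) :
    List Nat → List (String × String)
  | [] => emitSec h (PySem.Str.strip (PySem.Str.join "\n" (pre ++ lines.drop s)))
  | m :: ms =>
      emitSec h (PySem.Str.strip (PySem.Str.join "\n" (pre ++ (lines.drop s).take (m - s))))
        ++ pass2p lines [] (PySem.Str.strip (lines.getD m "")) (m + 2) ms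

lemma append_emit (secs : List (String × String)) (h b : String) :
    (if b ≠ "" then secs ++ [(h, b)] else secs) = secs ++ emitSec h b := by
  unfold emitSec; split <;> simp

lemma bMarks_ge (lines : List String) :
    ∀ k i, lines.length - i ≤ k → ∀ m ∈ bMarks lines i, i ≤ m := by
  intro k
  induction k with
  | zero =>
      intro i hk m hm
      rw [bMarks, dif_neg (by omega)] at hm
      simp at hm
  | succ k ih =>
      intro i hk m hm
      by_cases hi : i < lines.length
      · rw [bMarks, dif_pos hi] at hm
        by_cases hp : predIdx lines i
        · rw [if_pos hp, List.mem_cons] at hm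
          rcases hm with hm | hm
          · omega
          · have := ih (i + 2) (by omega) m hm; omega
        · rw [if_neg hp] at hm
          have := ih (i + 1) (by omega) m hm; omega
      · rw [bMarks, dif_neg hi] at hm
        simp at hm

lemma pass2p_shift (lines : List String) (pre : List String) (h : String) (i : Nat)
    (hi : i < lines.length) (ms : List Nat) (hms : ∀ m ∈ ms, i + 1 ≤ m) :
    pass2p lines pre h i ms = pass2p lines (pre ++ [lines[i]]) h (i + 1) ms := by
  have hdrop : lines.drop i = lines[i] :: lines.drop (i + 1) :=
    List.drop_eq_getElem_cons hi
  cases ms with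
  | nil => rw [pass2p, pass2p, hdrop, List.append_cons]
  | cons m ms =>
      have hm : i + 1 ≤ m := hms m (by simp)
      have hsub : m - i = (m - (i + 1)) + 1 := by omega
      rw [pass2p, pass2p, hdrop, hsub, List.take_succ_cons, List.append_cons]

lemma aLoop_eq_pass2p (lines : List String) :
    ∀ k i (h : String) (pre : List String) (secs : List (String × String)),
      lines.length - i ≤ k →
      aLoop (lines.drop i) h pre secs = secs ++ pass2p lines pre h i (bMarks lines i) := by
  intro k
  induction k with
  | zero =>
      intro i h pre secs hk
      have hdrop : lines.drop i = [] := List.drop_eq_nil_of_le (by omega)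
      rw [bMarks, dif_neg (by omega), hdrop, aLoop]
      simp only [pass2p, hdrop, List.append_nil]
      exact append_emit secs h _
  | succ k ih =>
      intro i h pre secs hk
      by_cases hi : i < lines.length
      · by_cases hp : predIdx lines i
        · -- heading at i
          have hi1 : i + 1 < lines.length := by
            by_contra hc
            have hnone : lines[i + 1]? = none := by
              rw [List.getElem?_eq_none_iff]; omega
            simp [predIdx, hnone] at hp
          have hdrop : lines.drop i = lines[i] :: lines[i + 1] :: lines.drop (i + 2) := by
            rw [List.drop_eq_getElem_cons hi, List.drop_eq_getElem_cons hi1]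
          have hpred : predHead lines[i] lines[i + 1] = true := by
            have h0 : lines[i]? = some lines[i] := List.getElem?_eq_getElem hi
            have h1 : lines[i + 1]? = some lines[i + 1] := List.getElem?_eq_getElem hi1
            simpa [predIdx, h0, h1] using hp
          rw [bMarks, dif_pos hi, if_pos hp, hdrop, aLoop]
          simp only [hpred, if_true]
          rw [ih (i + 2) _ _ _ (by omega), append_emit]
          have hgetD : lines.getD i "" = lines[i] := List.getD_eq_getElem lines "" hi
          simp only [pass2p, hgetD, Nat.sub_self, List.take_zero, List.append_nil,
            List.append_assoc]
        · -- body line at i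
          have hdrop : lines.drop i = lines[i] :: lines.drop (i + 1) :=
            List.drop_eq_getElem_cons hi
          rw [bMarks, dif_pos hi, if_neg hp,
            pass2p_shift lines pre h i hi _
              (bMarks_ge lines (lines.length - (i + 1)) (i + 1) le_rfl)]
          cases hdd : lines.drop (i + 1) with
          | nil =>
              have hlen : lines.length ≤ i + 1 := by
                have := List.drop_eq_nil_iff.mp hdd
                omega
              rw [hdrop, hdd, aLoop, bMarks, dif_neg (by omega)]
              simp only [pass2p, hdd, List.append_nil]
              exact append_emit secs h _
          | cons l1 rs =>
              have h1 : lines[i + 1]? = some l1 := by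
                have h2 : (lines.drop (i + 1))[0]? = lines[i + 1 + 0]? :=
                  List.getElem?_drop
                rw [hdd] at h2
                simpa using h2.symm
              have hpred : predHead lines[i] l1 = false := by
                have h0 : lines[i]? = some lines[i] := List.getElem?_eq_getElem hi
                simpa [predIdx, h0, h1] using hp
              rw [hdrop, hdd, aLoop]
              simp only [hpred, Bool.false_eq_true, if_false]
              rw [← hdd, ih (i + 1) _ _ _ (by omega)]
      · -- i ≥ length
        have hdrop : lines.drop i = [] := List.drop_eq_nil_of_le (by omega)
        rw [bMarks, dif_neg hi, hdrop, aLoop]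
        simp only [pass2p, hdrop, List.append_nil]
        exact append_emit secs h _

-- the fold of B's second pass equals pass2p
lemma zipfold_eq_pass2p (lines : List String) (marks : List Nat) (h : String) (s : Nat)
    (acc : List (String × String)) :
    (((h, s) :: marks.map (fun m => (PySem.Str.strip (lines.getD m ""), m + 2))).zip
        (marks ++ [lines.length])).foldl
      (fun acc be =>
        let body := PySem.Str.strip (PySem.Str.join "\n"
          (PySem.List.slice lines (some (be.1.2 : Int)) (some (be.2 : Int))))
        if body ≠ "" then acc ++ [(be.1.1, body)] else acc) acc
    = acc ++ pass2p lines [] h s marks := by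
  induction marks generalizing h s acc with
  | nil =>
      have hseg : PySem.List.slice lines (some (s : Int)) (some (lines.length : Int))
          = lines.drop s := by
        rw [PySem.List.slice_natCast]
        have hl : (lines.drop s).length = lines.length - s := List.length_drop
        rw [← hl, List.take_length]
      simp only [List.map_nil, List.nil_append, List.zip_cons_cons, List.zip_nil_right,
        List.foldl_cons, List.foldl_nil, hseg, pass2p]
      exact append_emit acc h _
  | cons m ms ih =>
      have hseg : PySem.List.slice lines (some (s : Int)) (some (m : Int))
          = (lines.drop s).take (m - s) := PySem.List.slice_natCast lines s m
      simp only [List.map_cons, List.cons_append, List.zip_cons_cons, List.foldl_cons]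
      rw [ih]
      simp only [hseg, pass2p, List.nil_append]
      rw [append_emit, List.append_assoc]

-- ===== VERDICT (by name: the statement is the Claim_ definition above) =====
theorem split_rst_sections_py_spec : Claim_equal_split_rst_sections_py := by
  intro text _
  unfold Spec_split_rst_sections_py split_rst_sections_py split_rst_sections_py_alt
  dsimp only
  have hA := aLoop_eq_pass2p ((PySem.Str.split? text "\n").getD [])
    (((PySem.Str.split? text "\n").getD []).length) 0 "" [] [] (by omega)
  simp only [List.drop_zero, List.nil_append] at hA
  rw [hA, zipfold_eq_pass2p]
  simp
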